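-- pv_equiv track=rewrite | github.com/bastian-stark/CountAllHexamers | CountAllHexamers_v3.py | checkNUCs
-- ===== SOURCE A (Python) =====
-- def checkNUCs(nucList, sequence, m):
--     n = 0
--     for char in sequence:
--         if char in nucList:
--             n += 1
--     if n == m:
--         return 0
--     else:
--         return 1
-- ===== SOURCE B (Python) =====
-- def checkNUCs(nucList, sequence, m):
--     # delete the matching characters and measure the length drop
--     # (entries longer than one char can never equal a single character,
--     #  so only the single-character entries go into the deletion table)
--     table = {ord(s): None for s in nucList if len(s) == 1}
--     n = len(sequence) - len(sequence.translate(table))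
--     return int(n != m)
-- ===== Notes on version B (the rewrite author's own statement) =====
-- stated objective: faster
-- what changed: B inverts counting into deletion: it builds a str.translate deletion table from the single-character nucList entries, strips those characters from the sequence in one C-level translate pass, and derives n as the length drop len(sequence) - len(stripped), instead of A's per-character membership test against nucList.
import Mathlib
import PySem

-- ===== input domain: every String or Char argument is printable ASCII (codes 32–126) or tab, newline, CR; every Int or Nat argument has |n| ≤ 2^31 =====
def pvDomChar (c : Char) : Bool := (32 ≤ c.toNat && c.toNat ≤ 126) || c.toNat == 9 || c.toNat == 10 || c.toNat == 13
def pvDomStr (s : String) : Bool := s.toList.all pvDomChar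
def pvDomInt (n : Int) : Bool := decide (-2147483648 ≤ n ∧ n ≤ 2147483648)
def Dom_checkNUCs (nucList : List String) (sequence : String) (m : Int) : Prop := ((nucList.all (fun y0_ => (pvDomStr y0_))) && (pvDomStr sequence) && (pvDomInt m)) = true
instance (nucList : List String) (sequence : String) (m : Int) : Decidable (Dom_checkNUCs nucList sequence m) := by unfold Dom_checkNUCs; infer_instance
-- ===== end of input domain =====

-- B deletes the matching characters (str.translate with a deletion table built from the
-- single-character nucList entries) and obtains n as the length drop, instead of A's
-- per-character membership count (objective: faster).
-- ===== PORT A =====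
-- n = 0; for char in sequence: if char in nucList: n += 1; return 0 if n == m else 1
def checkNUCs (nucList : List String) (sequence : String) (m : Int) : Int :=
  let n : Int := sequence.toList.foldl
    (fun n c => if nucList.contains (String.ofList [c]) then n + 1 else n) 0
  if n = m then 0 else 1

-- ===== PORT B =====
-- table = {ord(s): None for s in nucList if len(s) == 1}
-- n = len(sequence) - len(sequence.translate(table)); return int(n != m)
-- translate with a deletion-only table is ported by hand (exact: it removes precisely the
-- characters whose code point is a key of the table).
def checkNUCs_alt (nucList : List String) (sequence : String) (m : Int) : Int :=
  let table : PySem.Dict Int (Option Int) :=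
    (nucList.filter (fun s => PySem.Str.len s == 1)).foldl
      (fun d s => d.insert ((s.toList.headD ' ').toNat : Int) none) PySem.Dict.empty
  let stripped : List Char := sequence.toList.filter (fun c => !(table.contains (c.toNat : Int)))
  let n : Int := PySem.Str.len sequence - stripped.length
  if n ≠ m then 1 else 0

-- ===== PRECONDITION & SPEC =====
def Spec_checkNUCs (nucList : List String) (sequence : String) (m : Int) (out : Int) : Prop := out = checkNUCs_alt nucList sequence m
instance (nucList : List String) (sequence : String) (m : Int) (out : Int) : Decidable (Spec_checkNUCs nucList sequence m out) := by unfold Spec_checkNUCs; infer_instance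

-- ===== CLAIM =====
def Claim_equal_checkNUCs : Prop := ∀ (nucList : List String) (sequence : String) (m : Int), Dom_checkNUCs nucList sequence m → Spec_checkNUCs nucList sequence m (checkNUCs nucList sequence m)

-- ===== LEMMAS AND PROOFS =====

-- the deletion table contains exactly the codes of the length-1 entries of nucList,
-- i.e. precisely the characters c with String.ofList [c] ∈ nucList
theorem table_contains_iff (nucList : List String) (c : Char) :
    ((nucList.filter (fun s => PySem.Str.len s == 1)).foldl
        (fun d s => d.insert ((s.toList.headD ' ').toNat : Int) (none : Option Int))
        PySem.Dict.empty).contains ((c.toNat : Int))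
      = nucList.contains (String.ofList [c]) := by
  rw [PySem.Dict.contains_eq_decide_mem_keys, PySem.Dict.keys_foldl_insert_key]
  rw [PySem.Dict.keys_empty, PySem.Set.update_eq_append_filter]
  simp only [PySem.Set.contains, List.nil_append]
  simp only [List.elem_nil, Bool.not_false, List.filter_true]
  rw [Bool.eq_iff_iff, decide_eq_true_iff, List.contains_iff_mem]
  rw [PySem.Set.mem_ofList, List.mem_map]
  constructor
  · rintro ⟨s, hs, hkey⟩
    rw [List.mem_filter] at hs
    obtain ⟨hmem, hlen⟩ := hs
    rw [beq_iff_eq, PySem.Str.len_eq] at hlen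
    have hl1 : s.toList.length = 1 := by exact_mod_cast hlen
    obtain ⟨d, hd⟩ := List.length_eq_one_iff.mp hl1
    rw [hd] at hkey
    simp only [List.headD_cons] at hkey
    have hdc : d = c := Char.ext (UInt32.toNat_inj.mp (by exact_mod_cast hkey))
    have hsc : s = String.ofList [c] := by
      rw [← String.ofList_toList (s := s), hd, hdc]
    rwa [← hsc]
  · intro hmem
    refine ⟨String.ofList [c], ?_, ?_⟩
    · rw [List.mem_filter]
      refine ⟨hmem, ?_⟩
      rw [beq_iff_eq, PySem.Str.len_eq]
      simp [String.toList_ofList]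
    · simp [String.toList_ofList]

-- counting the kept characters = length minus the deleted ones
theorem countP_not_add (l : List Char) (q : Char → Bool) :
    l.countP (fun c => !(q c)) + l.countP q = l.length := by
  induction l with
  | nil => simp
  | cons a l ih => by_cases h : q a <;> simp [h, ← ih] <;> omega

theorem checkNUCs_spec : Claim_equal_checkNUCs := by
  intro nucList sequence m _
  unfold Spec_checkNUCs checkNUCs checkNUCs_alt
  simp only [PySem.List.foldl_count_if, zero_add]
  have h1 : (sequence.toList.filter (fun c =>
      !(((nucList.filter (fun s => PySem.Str.len s == 1)).foldl
        (fun d s => d.insert ((s.toList.headD ' ').toNat : Int) (none : Option Int))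
        PySem.Dict.empty).contains ((c.toNat : Int))))).length
      = sequence.toList.countP (fun c => !(nucList.contains (String.ofList [c]))) := by
    rw [← List.countP_eq_length_filter]
    apply List.countP_congr
    intro c _
    rw [table_contains_iff nucList c]
  have h2 : PySem.Str.len sequence = (sequence.toList.length : Int) := PySem.Str.len_eq sequence
  simp only [h1, h2]
  have hadd := countP_not_add sequence.toList (fun c => nucList.contains (String.ofList [c]))
  have key : ((sequence.toList.length : Int)
      - (sequence.toList.countP (fun c => !(nucList.contains (String.ofList [c]))) : Nat))
      = (sequence.toList.countP (fun c => nucList.contains (String.ofList [c])) : Nat) := by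
    omega
  simp only [key]
  simp [ite_not, eq_comm]
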